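-- pv_equiv track=rewrite | github.com/student079/Algorithm | 프로그래머스/lv3/12938. 최고의 집합/최고의 집합.py | solution
-- ===== SOURCE A (Python) =====
-- def solution(n, s):
--     if s < n:
--         return [-1]
--
--     num = s // n
--
--     answer = [num] * n
--
--     for idx in range(s%n):
--         answer[n -idx -1] += 1
--
--     return answer
-- ===== SOURCE B (Python) =====
-- def solution(n, s):
--     if s < n:
--         return [-1]
--     answer = []
--     t, m = s, n
--     while m > 0:
--         v = t // m
--         answer.append(v)
--         t -= v
--         m -= 1
--     return answer
-- ===== Notes on version B (the rewrite author's own statement) =====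
-- stated objective: alternative
-- what changed: Replaces A's allocate-[s//n]*n-then-increment-a-suffix scheme with a greedy single pass that repeatedly emits t//m for the remaining sum t and remaining count m (no upfront divmod, no replication, no index arithmetic).
import Mathlib
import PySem

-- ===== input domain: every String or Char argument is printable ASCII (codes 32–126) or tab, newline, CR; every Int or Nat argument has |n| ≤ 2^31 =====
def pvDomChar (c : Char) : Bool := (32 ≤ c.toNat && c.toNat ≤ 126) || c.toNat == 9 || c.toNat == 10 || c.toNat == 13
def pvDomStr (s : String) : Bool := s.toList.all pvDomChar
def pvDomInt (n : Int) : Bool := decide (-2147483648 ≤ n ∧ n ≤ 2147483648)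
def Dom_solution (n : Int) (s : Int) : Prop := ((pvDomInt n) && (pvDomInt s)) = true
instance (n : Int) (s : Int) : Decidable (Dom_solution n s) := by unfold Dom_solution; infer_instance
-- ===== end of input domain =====

-- B replaces A's allocate-then-increment-a-suffix scheme by a greedy single pass emitting t//m
-- for the remaining sum t and remaining count m; return values proved equal on Pre_.

-- ===== PORT A =====
def solution (n : Int) (s : Int) : List Int :=
  if s < n then [-1]
  else
    let num := PySem.Int.floordiv s n
    let answer := List.replicate n.toNat num
    (PySem.List.pyRange 0 (PySem.Int.mod s n) 1).foldl
      (fun ans idx =>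
        PySem.List.pySetD ans (n - idx - 1) (PySem.List.pyGetD ans (n - idx - 1) 0 + 1)) answer

-- ===== PORT B =====
-- the while loop of Source B: state (t, m, answer); runs while 0 < m, appending t // m
def solAltLoop (t m : Int) (acc : List Int) : List Int :=
  if _h : 0 < m then
    let v := PySem.Int.floordiv t m
    solAltLoop (t - v) (m - 1) (acc ++ [v])
  else acc
termination_by m.toNat
decreasing_by omega

def solution_alt (n : Int) (s : Int) : List Int :=
  if s < n then [-1]
  else solAltLoop s n []

-- ===== PRECONDITION & SPEC =====
-- Pre_ excludes exactly n = 0 with s ≥ n, where Python A's s // n raises ZeroDivisionError.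
def Pre_solution (n : Int) (s : Int) : Prop := n = 0 → s < n
instance (n : Int) (s : Int) : Decidable (Pre_solution n s) := by unfold Pre_solution; infer_instance
def pvWitness_solution : Int × Int := (3, 7)

def Spec_solution (n : Int) (s : Int) (out : List Int) : Prop := out = solution_alt n s
instance (n : Int) (s : Int) (out : List Int) : Decidable (Spec_solution n s out) := by unfold Spec_solution; infer_instance

-- ===== CLAIM (what is proved, stated in full; the proofs are below) =====
def Claim_equal_solution : Prop := ∀ (n : Int) (s : Int), Dom_solution n s → Pre_solution n s → Spec_solution n s (solution n s)

-- ===== LEMMAS AND PROOFS =====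

-- A-side: one loop step at index m-1 on a block list increments the last q of the first block.
lemma step_block (q : Int) (m : Nat) (hm : 1 ≤ m) (ys : List Int) :
    PySem.List.pySetD (List.replicate m q ++ ys) ((m : Int) - 1)
      (PySem.List.pyGetD (List.replicate m q ++ ys) ((m : Int) - 1) 0 + 1)
    = List.replicate (m - 1) q ++ (q + 1) :: ys := by
  obtain ⟨m, rfl⟩ := Nat.exists_eq_add_of_le hm
  have hcast : ((1 + m : Nat) : Int) - 1 = ((m : Nat) : Int) := by push_cast; ring
  rw [hcast, PySem.List.pyGetD_natCast, PySem.List.pySetD_natCast]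
  have hrep : List.replicate (1 + m) q = List.replicate m q ++ [q] := by
    rw [Nat.add_comm, List.replicate_succ']
  rw [hrep, List.append_assoc]
  have hget : (List.replicate m q ++ ([q] ++ ys)).getD m 0 = q := by
    rw [List.getD, List.getElem?_append_right (by simp)]
    simp
  rw [hget]
  have hset : (List.replicate m q ++ ([q] ++ ys)).set m (q + 1)
      = List.replicate m q ++ ((q + 1) :: ys) := by
    rw [List.set_append_right _ _ (by simp)]
    simp
  rw [hset]
  simp

-- A-side: the loop over range(0,k) applied to [q]*N yields [q]*(N-k) ++ [q+1]*k, for k ≤ N with (N:Int) = n.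
lemma loop_blocks (q n : Int) (N k : Nat) (hnN : (N : Int) = n) (hk : k ≤ N) :
    (PySem.List.pyRange 0 (k : Int) 1).foldl
      (fun ans idx =>
        PySem.List.pySetD ans (n - idx - 1) (PySem.List.pyGetD ans (n - idx - 1) 0 + 1))
      (List.replicate N q)
    = List.replicate (N - k) q ++ List.replicate k (q + 1) := by
  induction k with
  | zero => simp
  | succ k ih =>
    have hk' : k ≤ N := Nat.le_of_succ_le hk
    have hsplit : PySem.List.pyRange 0 ((k : Int) + 1) 1
        = PySem.List.pyRange 0 (k : Int) 1 ++ [(k : Int)] :=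
      PySem.List.pyRange_one_succ_right (by positivity)
    have hcast : ((k + 1 : Nat) : Int) = (k : Int) + 1 := by push_cast; ring
    rw [hcast, hsplit, List.foldl_append, ih hk']
    simp only [List.foldl_cons, List.foldl_nil]
    have hidx : n - (k : Int) - 1 = ((N - k : Nat) : Int) - 1 := by omega
    rw [hidx, step_block q (N - k) (by omega)]
    have h1 : N - k - 1 = N - (k + 1) := by omega
    rw [h1]
    rw [show (q + 1) :: List.replicate k (q + 1) = List.replicate (k + 1) (q + 1) from rfl]

-- B-side, saturated phase: once t = v * m, every remaining step emits v.
lemma solAltLoop_exact (v : Int) : ∀ (k : Nat) (acc : List Int),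
    solAltLoop (v * (k : Int)) (k : Int) acc = acc ++ List.replicate k v := by
  intro k
  induction k with
  | zero => intro acc; rw [solAltLoop]; simp
  | succ k ih =>
    intro acc
    rw [solAltLoop]
    have hpos : (0 : Int) < ((k + 1 : Nat) : Int) := by positivity
    rw [dif_pos hpos]
    have hdiv : PySem.Int.floordiv (v * ((k + 1 : Nat) : Int)) ((k + 1 : Nat) : Int) = v := by
      rw [PySem.Int.floordiv_eq_iff_of_pos hpos]
      constructor <;> nlinarith
    simp only [hdiv]
    have ht : v * ((k + 1 : Nat) : Int) - v = v * (k : Int) := by push_cast; ring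
    have hm : ((k + 1 : Nat) : Int) - 1 = (k : Int) := by push_cast; ring
    rw [ht, hm, ih]
    simp [List.replicate_succ]

-- B-side, main phase: with t = q*(r+d) + r and m = r+d (0 ≤ r), the loop emits d copies of q
-- and then r copies of q+1.
lemma solAltLoop_blocks (q : Int) : ∀ (d r : Nat) (acc : List Int),
    solAltLoop (q * ((r + d : Nat) : Int) + (r : Int)) ((r + d : Nat) : Int) acc
      = acc ++ List.replicate d q ++ List.replicate r (q + 1) := by
  intro d
  induction d with
  | zero =>
    intro r acc
    have ht : q * ((r + 0 : Nat) : Int) + (r : Int) = (q + 1) * (r : Int) := by push_cast; ring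
    have hm : ((r + 0 : Nat) : Int) = (r : Int) := by push_cast; ring
    rw [ht, hm, solAltLoop_exact (q + 1) r acc]
    simp
  | succ d ih =>
    intro r acc
    rw [solAltLoop]
    have hpos : (0 : Int) < ((r + (d + 1) : Nat) : Int) := by positivity
    rw [dif_pos hpos]
    have hdiv : PySem.Int.floordiv (q * ((r + (d + 1) : Nat) : Int) + (r : Int)) ((r + (d + 1) : Nat) : Int) = q := by
      rw [PySem.Int.floordiv_eq_iff_of_pos hpos]
      have h1 : (0 : Int) ≤ (r : Int) := by positivity
      have h2 : (r : Int) < ((r + (d + 1) : Nat) : Int) := by push_cast; omega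
      constructor <;> nlinarith
    simp only [hdiv]
    have ht : q * ((r + (d + 1) : Nat) : Int) + (r : Int) - q
        = q * ((r + d : Nat) : Int) + (r : Int) := by push_cast; ring
    have hm : ((r + (d + 1) : Nat) : Int) - 1 = ((r + d : Nat) : Int) := by push_cast; ring
    rw [ht, hm, ih r]
    simp [List.replicate_succ]

theorem solution_eq (n s : Int) (hpre : Pre_solution n s) : solution n s = solution_alt n s := by
  unfold solution solution_alt
  by_cases hlt : s < n
  · simp [hlt]
  · simp only [hlt, if_false]
    rcases lt_trichotomy n 0 with hn | hn | hn
    · -- n < 0: A's list is empty, its loop range is empty; B's loop never runs.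
      have hmod := PySem.Int.mod_neg_bounds s hn
      have h1 : n.toNat = 0 := by omega
      have h2 : PySem.List.pyRange 0 (PySem.Int.mod s n) 1 = [] :=
        PySem.List.pyRange_one_eq_nil (by omega)
      rw [solAltLoop, dif_neg (by omega)]
      simp [h1, h2]
    · exact absurd (hpre hn) (by omega)
    · -- n > 0
      have hr0 := PySem.Int.mod_nonneg s hn
      have hrn := PySem.Int.mod_lt s hn
      have heq := PySem.Int.floordiv_mul_add_mod s n
      set q := PySem.Int.floordiv s n with hq
      set r := PySem.Int.mod s n with hr
      -- A side
      have hrk : r = ((r.toNat : Nat) : Int) := by omega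
      have hnN : ((n.toNat : Nat) : Int) = n := by omega
      have hkN : r.toNat ≤ n.toNat := by omega
      rw [hrk, loop_blocks q n n.toNat r.toNat hnN hkN]
      -- B side: d = n - r, r.toNat + d = n.toNat
      have hd : r.toNat + (n.toNat - r.toNat) = n.toNat := by omega
      have hB : solAltLoop s n []
          = solAltLoop (q * ((r.toNat + (n.toNat - r.toNat) : Nat) : Int) + ((r.toNat : Nat) : Int))
              ((r.toNat + (n.toNat - r.toNat) : Nat) : Int) [] := by
        rw [hd, hnN]; congr 1; omega
      rw [hB, solAltLoop_blocks q (n.toNat - r.toNat) r.toNat []]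
      simp

-- ===== VERDICT (by name: the statements are the Claim_ definitions above) =====
theorem solution_spec : Claim_equal_solution := by
  intro n s _ hpre
  exact solution_eq n s hpre
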